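-- pv_equiv track=rewrite | github.com/slyyyle/mlbeattheodds | src/ml/risk_management.py | _calculate_streaks
-- ===== SOURCE A (Python) =====
-- from typing import Dict, List, Tuple, Optional
--
-- def _calculate_streaks(settled_bets: List[Dict]) -> Tuple[int, int]:
--     """Calculate longest winning and losing streaks."""
--     if not settled_bets:
--         return 0, 0
--
--     max_win_streak = 0
--     max_loss_streak = 0
--     current_win_streak = 0
--     current_loss_streak = 0
--
--     for bet in settled_bets:
--         if bet['result'] == 'win':
--             current_win_streak += 1
--             current_loss_streak = 0
--             max_win_streak = max(max_win_streak, current_win_streak)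
--         else:
--             current_loss_streak += 1
--             current_win_streak = 0
--             max_loss_streak = max(max_loss_streak, current_loss_streak)
--
--     return max_win_streak, max_loss_streak
-- ===== SOURCE B (Python) =====
-- def _calculate_streaks(settled_bets):
--     """Calculate longest winning and losing streaks."""
--     # Phase 1: split the sequence into maximal runs of equal outcome
--     # (kept as (is_win, length) pairs, most recent run first).
--     runs = []
--     for bet in settled_bets:
--         f = bet['result'] == 'win'
--         if runs and runs[0][0] == f:
--             runs[0] = (f, runs[0][1] + 1)
--         else:
--             runs.insert(0, (f, 1))
--     # Phase 2: longest run of each kind.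
--     return (max([n for f, n in runs if f], default=0),
--             max([n for f, n in runs if not f], default=0))
-- ===== Notes on version B (the rewrite author's own statement) =====
-- stated objective: alternative
-- what changed: B first compresses the bet sequence into maximal (outcome, run-length) groups and then takes the maximum run length of each kind, instead of A's single pass carrying four interacting streak counters.
import Mathlib
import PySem

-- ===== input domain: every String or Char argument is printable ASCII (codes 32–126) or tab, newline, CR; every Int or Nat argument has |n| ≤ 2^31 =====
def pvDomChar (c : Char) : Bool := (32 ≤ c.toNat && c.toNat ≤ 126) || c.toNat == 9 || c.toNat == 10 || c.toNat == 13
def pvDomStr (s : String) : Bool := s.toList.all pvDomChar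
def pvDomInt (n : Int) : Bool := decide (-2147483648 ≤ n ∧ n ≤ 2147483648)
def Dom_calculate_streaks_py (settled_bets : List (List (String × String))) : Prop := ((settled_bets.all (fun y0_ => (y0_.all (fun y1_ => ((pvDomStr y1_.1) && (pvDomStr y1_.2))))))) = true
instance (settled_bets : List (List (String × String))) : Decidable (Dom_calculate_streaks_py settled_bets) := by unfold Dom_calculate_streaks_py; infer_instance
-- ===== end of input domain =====

-- B replaces A's single pass with four interacting streak counters by a run-length
-- compression of the outcome sequence followed by a max over each kind of run (alternative).

-- bet['result'] : first-match association-list lookup; '' stands for the missing-key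
-- case, which Pre_ excludes (Python raises KeyError there).
def pvResult (bet : List (String × String)) : String :=
  ((bet.find? (fun kv => kv.1 == "result")).map Prod.snd).getD ""

-- ===== PORT A =====
-- one loop step of A: state (max_win, max_loss, cur_win, cur_loss)
def pvAStep (st : Int × Int × Int × Int) (bet : List (String × String)) : Int × Int × Int × Int :=
  if pvResult bet == "win" then
    (max st.1 (st.2.2.1 + 1), st.2.1, st.2.2.1 + 1, 0)
  else
    (st.1, max st.2.1 (st.2.2.2 + 1), 0, st.2.2.2 + 1)

def calculate_streaks_py (settled_bets : List (List (String × String))) : Int × Int :=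
  if settled_bets.isEmpty then (0, 0)
  else
    let s := settled_bets.foldl pvAStep (0, 0, 0, 0)
    (s.1, s.2.1)

-- ===== PORT B =====
-- add one outcome to the run list (most recent run kept in front)
def pvPushRun (runs : List (Bool × Int)) (f : Bool) : List (Bool × Int) :=
  match runs with
  | (g, k) :: rest => if g == f then (g, k + 1) :: rest else (f, 1) :: (g, k) :: rest
  | [] => [(f, 1)]

-- max([n for g, n in runs if g == v], default=0); run lengths are ≥ 1, so the 0 floor is exact
def pvMaxRun (v : Bool) : List (Bool × Int) → Int
  | [] => 0
  | (g, k) :: rest => if g == v then max (pvMaxRun v rest) k else pvMaxRun v rest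

def calculate_streaks_py_alt (settled_bets : List (List (String × String))) : Int × Int :=
  let runs := settled_bets.foldl (fun rs bet => pvPushRun rs (pvResult bet == "win")) []
  (pvMaxRun true runs, pvMaxRun false runs)

-- ===== PRECONDITION & SPEC =====
-- Pre_ excludes only bets missing the 'result' key, on which Python A raises KeyError.
def Pre_calculate_streaks_py (settled_bets : List (List (String × String))) : Prop :=
  ∀ b ∈ settled_bets, "result" ∈ b.map Prod.fst
instance (settled_bets : List (List (String × String))) : Decidable (Pre_calculate_streaks_py settled_bets) := by unfold Pre_calculate_streaks_py; infer_instance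
def pvWitness_calculate_streaks_py : (List (List (String × String))) :=
  [[("result", "win")], [("result", "loss")], [("result", "win")]]

def Spec_calculate_streaks_py (settled_bets : List (List (String × String))) (out : Int × Int) : Prop := out = calculate_streaks_py_alt settled_bets
instance (settled_bets : List (List (String × String))) (out : Int × Int) : Decidable (Spec_calculate_streaks_py settled_bets out) := by unfold Spec_calculate_streaks_py; infer_instance

-- ===== CLAIM (what is proved, stated in full; the proofs are below) =====
def Claim_equal_calculate_streaks_py : Prop := ∀ (settled_bets : List (List (String × String))), Dom_calculate_streaks_py settled_bets → Pre_calculate_streaks_py settled_bets → Spec_calculate_streaks_py settled_bets (calculate_streaks_py settled_bets)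

-- ===== LEMMAS AND PROOFS =====

-- length of the current (front) run of kind v, 0 if the front run is of the other kind
def pvCurRun (v : Bool) (runs : List (Bool × Int)) : Int :=
  match runs with
  | (g, k) :: _ => if g == v then k else 0
  | [] => 0

-- A's state after a prefix is exactly determined by B's run list for that prefix
lemma pv_step_sim (runs : List (Bool × Int)) (bet : List (String × String)) :
    pvAStep (pvMaxRun true runs, pvMaxRun false runs, pvCurRun true runs, pvCurRun false runs) bet
      = (let r := pvPushRun runs (pvResult bet == "win")
         (pvMaxRun true r, pvMaxRun false r, pvCurRun true r, pvCurRun false r)) := by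
  cases runs with
  | nil =>
      by_cases h : pvResult bet == "win" <;>
        simp [pvAStep, pvPushRun, pvMaxRun, pvCurRun, h]
  | cons hd tl =>
      obtain ⟨g, k⟩ := hd
      by_cases h : pvResult bet == "win" <;> cases g <;>
        simp [pvAStep, pvPushRun, pvMaxRun, pvCurRun, h]
      all_goals omega

lemma pv_fold_sim (bets : List (List (String × String))) (runs : List (Bool × Int)) :
    bets.foldl pvAStep (pvMaxRun true runs, pvMaxRun false runs, pvCurRun true runs, pvCurRun false runs)
      = (let r := bets.foldl (fun rs bet => pvPushRun rs (pvResult bet == "win")) runs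
         (pvMaxRun true r, pvMaxRun false r, pvCurRun true r, pvCurRun false r)) := by
  induction bets generalizing runs with
  | nil => rfl
  | cons b rest ih =>
      simp only [List.foldl_cons, pv_step_sim]
      exact ih _

-- ===== VERDICT (by name: the statement is the Claim_ definition above) =====
theorem calculate_streaks_py_spec : Claim_equal_calculate_streaks_py := by
  intro bets _ _
  unfold Spec_calculate_streaks_py calculate_streaks_py calculate_streaks_py_alt
  cases bets with
  | nil => rfl
  | cons b rest =>
      have h := pv_fold_sim (b :: rest) []
      simp only [pvMaxRun, pvCurRun] at h
      simp [h]
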